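-- pv_equiv track=rewrite | github.com/tombulled/advent-of-code | 2025/day-03/app.py | find_batteries_to_turn_on
-- ===== SOURCE A (Python) =====
-- from typing import Final, Iterable, NamedTuple, Sequence, TypeAlias
--
-- Battery: TypeAlias = int  # joltage
--
-- Bank: TypeAlias = Sequence[Battery]
--
-- MAX_JOLTAGE: Final[int] = 9
--
-- class IndexedBattery(NamedTuple):
--     battery: Battery
--     index_: int
--
-- def find_first_battery_with_highest_joltage(bank: Bank, /) -> IndexedBattery:
--     highest_index: int = 0
--     highest_battery: Battery = bank[0]
--
--     index: int
--     battery: Battery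
--     for index, battery in enumerate(bank[1:]):
--         # If this has a lower (or equal!) joltage, ignore it.
--         if battery <= highest_battery:
--             continue
--
--         # New winner!
--         highest_index = index + 1
--         highest_battery = battery
--
--         # Nice little optimisation: If the battery has the maximum possible voltage, we can exit early.
--         if highest_battery == MAX_JOLTAGE:
--             break
--
--     return IndexedBattery(highest_battery, highest_index)
--
-- def find_batteries_to_turn_on(bank: Bank, count: int) -> Iterable[IndexedBattery]:
--     bank_len: int = len(bank)
--     offset: int = 0
--
--     total_batteries_left_to_find: int
--     for total_batteries_left_to_find in range(count, 0, -1):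
--         # Create a subset of the bank, covering the valid search space.
--         sub_bank: Bank = bank[offset : bank_len - total_batteries_left_to_find + 1]
--
--         # Find the first battery with the highest joltage within the sub-bank (the search space)
--         battery: IndexedBattery = find_first_battery_with_highest_joltage(sub_bank)
--
--         # Calculate the true battery index (taking into account the offset)
--         true_battery_index: int = offset + battery.index_
--
--         # Update the index offset now that our search space has shrunk
--         offset = true_battery_index + 1
--
--         # Yield the battery with a fixed index
--         yield IndexedBattery(battery.battery, true_battery_index)
-- ===== SOURCE B (Python) =====
-- def find_batteries_to_turn_on(bank, count):
--     # One left-to-right pass with a monotonic stack: pop a smaller battery while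
--     # enough batteries remain to still reach `count` picks; keep equal values so
--     # the FIRST battery of a maximal joltage wins, as in the greedy version.
--     n = len(bank)
--     stack = []
--     for index, battery in enumerate(bank):
--         while stack and stack[-1][0] < battery and len(stack) + (n - index) > count:
--             stack.pop()
--         if len(stack) < count:
--             stack.append((battery, index))
--     return stack
-- ===== Notes on version B (the rewrite author's own statement) =====
-- stated objective: faster
-- what changed: Replaces the greedy rescan of a shrinking window for each of the count picks with a single left-to-right pass over the bank using a monotonic stack (pop a strictly smaller battery while enough batteries remain to reach count picks), which yields the same order-preserving selection in one pass; Pre_ also restricts to the function's natural joltage domain: banks where no battery greater than MAX_JOLTAGE=9 follows a 9 (A's early-exit at MAX_JOLTAGE assumes joltages are digits 0-9), and to count <= len(bank) since A raises IndexError otherwise.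
-- outside the precondition, e.g. on find_batteries_to_turn_on([1, 9, 10], 1): A returns [(9, 1)], B returns [(10, 2)]
import Mathlib
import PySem

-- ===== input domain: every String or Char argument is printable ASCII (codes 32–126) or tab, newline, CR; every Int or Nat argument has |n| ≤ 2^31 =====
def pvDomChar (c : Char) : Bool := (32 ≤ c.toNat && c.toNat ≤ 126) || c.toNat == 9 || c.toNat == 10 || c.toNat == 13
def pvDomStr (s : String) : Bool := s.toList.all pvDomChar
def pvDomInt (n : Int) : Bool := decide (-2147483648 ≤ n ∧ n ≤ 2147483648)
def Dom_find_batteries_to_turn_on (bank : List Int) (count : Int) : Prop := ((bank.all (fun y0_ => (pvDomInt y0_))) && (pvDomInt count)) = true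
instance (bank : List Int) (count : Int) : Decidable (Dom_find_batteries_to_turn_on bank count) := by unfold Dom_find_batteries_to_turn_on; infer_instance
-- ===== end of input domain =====

-- B replaces A's per-pick rescan of a shrinking window (O(n*count)) with one
-- left-to-right monotonic-stack pass (O(n)); equivalence is claimed on banks
-- within the function's natural joltage domain (see Pre_ below).

-- ===== PORT A =====
-- inner loop of find_first_battery_with_highest_joltage: for index, battery in
-- enumerate(bank[1:]): … ; returns (highest_battery, highest_index); the
-- early 'break' at MAX_JOLTAGE = 9 is the second branch.
def ffLoop (hb hi : Int) : List (Int × Int) → Int × Int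
  | [] => (hb, hi)
  | (index, battery) :: rest =>
    if battery ≤ hb then ffLoop hb hi rest
    else if battery = 9 then (battery, index + 1)
    else ffLoop battery (index + 1) rest

def find_first_battery_with_highest_joltage (bank : List Int) : Int × Int :=
  match bank with
  | [] => (0, 0)  -- Python raises IndexError on bank[0]: unreachable under Pre_ (totality guard only)
  | b0 :: _ => ffLoop b0 0 (PySem.List.enumerate (PySem.List.slice bank (some 1) none) 0)

-- one iteration of A's 'for total_batteries_left_to_find in range(count, 0, -1)'
-- loop; the state is (offset, results so far).
def fbStepA (bank : List Int) (st : Int × List (Int × Int)) (t : Int) : Int × List (Int × Int) :=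
  let sub := PySem.List.slice bank (some st.1) (some ((bank.length : Int) - t + 1))
  let b := find_first_battery_with_highest_joltage sub
  let trueIdx := st.1 + b.2
  (trueIdx + 1, st.2 ++ [(b.1, trueIdx)])

def find_batteries_to_turn_on (bank : List Int) (count : Int) : List (Int × Int) :=
  ((PySem.List.pyRange count 0 (-1)).foldl (fbStepA bank) (0, [])).2

-- ===== PORT B =====
-- B's 'while stack and stack[-1][0] < battery and len(stack) + (n - index) > count:
-- stack.pop()' (stack kept top-first here, reversed once at the end; nmi = n - index)
def fbPop (count nmi b : Int) : List (Int × Int) → List (Int × Int)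
  | [] => []
  | (v, j) :: rest =>
    if v < b ∧ (rest.length : Int) + 1 + nmi > count then fbPop count nmi b rest
    else (v, j) :: rest

-- one iteration of B's 'for index, battery in enumerate(bank)' loop (p = (index, battery))
def fbStepB (bank : List Int) (count : Int) (stack : List (Int × Int)) (p : Int × Int) : List (Int × Int) :=
  let stack' := fbPop count ((bank.length : Int) - p.1) p.2 stack
  if (stack'.length : Int) < count then (p.2, p.1) :: stack' else stack'

def find_batteries_to_turn_on_alt (bank : List Int) (count : Int) : List (Int × Int) :=
  ((PySem.List.enumerate bank 0).foldl (fbStepB bank count) []).reverse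

-- ===== PRECONDITION & SPEC =====
-- Pre_ excludes (a) count > len(bank), where A raises IndexError, and (b) banks
-- outside the function's natural joltage domain (digits 0..9): a battery greater
-- than MAX_JOLTAGE = 9 occurring after a 9, where A's early-exit at MAX_JOLTAGE
-- stops the scan before the true maximum.
def Pre_find_batteries_to_turn_on (bank : List Int) (count : Int) : Prop :=
  count ≤ (bank.length : Int) ∧ List.Pairwise (fun a b => a = 9 → b ≤ 9) bank

instance (bank : List Int) (count : Int) : Decidable (Pre_find_batteries_to_turn_on bank count) := by
  unfold Pre_find_batteries_to_turn_on; infer_instance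

def pvWitness_find_batteries_to_turn_on : List Int × Int := ([3, 1, 4, 1, 5, 9, 2, 6], 3)

def Spec_find_batteries_to_turn_on (bank : List Int) (count : Int) (out : List (Int × Int)) : Prop := out = find_batteries_to_turn_on_alt bank count
instance (bank : List Int) (count : Int) (out : List (Int × Int)) : Decidable (Spec_find_batteries_to_turn_on bank count out) := by unfold Spec_find_batteries_to_turn_on; infer_instance

-- ===== CLAIM (what is proved, stated in full; the proofs are below) =====
def Claim_equal_find_batteries_to_turn_on : Prop := ∀ (bank : List Int) (count : Int), Dom_find_batteries_to_turn_on bank count → Pre_find_batteries_to_turn_on bank count → Spec_find_batteries_to_turn_on bank count (find_batteries_to_turn_on bank count)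

-- ===== LEMMAS AND PROOFS =====

-- proof-layer description of A: the chain of greedy picks (uses A's own helper)
def pvChain (bank : List Int) : Nat → Nat → List (Int × Int)
  | 0, _ => []
  | k+1, off =>
    let w := (bank.drop off).take (bank.length - k - off)
    let p := find_first_battery_with_highest_joltage w
    (p.1, (off : Int) + p.2) :: pvChain bank k (off + p.2.toNat + 1)

-- the inner scan with the MAX_JOLTAGE break, characterised under the Pre_ condition
lemma ffLoop_spec (rest : List Int) (s hb hi : Int)
    (hp : List.Pairwise (fun a b => a = 9 → b ≤ 9) rest) :
    (ffLoop hb hi (PySem.List.enumerate rest s) = (hb, hi) ∧ ∀ y ∈ rest, y ≤ hb)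
    ∨ (∃ j : Nat, ∃ hj : j < rest.length,
        ffLoop hb hi (PySem.List.enumerate rest s) = (rest[j], s + j + 1) ∧ hb < rest[j]
        ∧ (∀ j' (_ : j' < j), rest[j'] < rest[j])
        ∧ (∀ j' (h' : j' < rest.length), rest[j'] ≤ rest[j])) := by
  induction rest generalizing s hb hi with
  | nil =>
    left
    exact ⟨by rw [PySem.List.enumerate_nil]; rfl, by intro y hy; simp at hy⟩
  | cons b r ih =>
    rcases List.pairwise_cons.mp hp with ⟨h9, hpr⟩
    rw [PySem.List.enumerate_cons, ffLoop]
    by_cases hble : b ≤ hb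
    · rw [if_pos hble]
      rcases ih (s + 1) hb hi hpr with ⟨heq, hall⟩ | ⟨j, hj, heq, hlt, hstr, hle⟩
      · left
        refine ⟨heq, ?_⟩
        intro y hy
        rcases List.mem_cons.mp hy with rfl | hy
        · exact hble
        · exact hall _ hy
      · right
        refine ⟨j + 1, by simpa using Nat.succ_lt_succ hj, ?_, by simpa using hlt, ?_, ?_⟩
        · rw [heq]
          simp only [List.getElem_cons_succ, Prod.mk.injEq]
          refine ⟨by trivial, by push_cast; ring⟩
        · intro j' hj'
          cases j' with
          | zero => simpa using lt_of_le_of_lt hble hlt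
          | succ j'' =>
            have hj'' : j'' < j := by omega
            simpa using hstr j'' hj''
        · intro j' hj'
          cases j' with
          | zero => simpa using le_of_lt (lt_of_le_of_lt hble hlt)
          | succ j'' =>
            have hj'' : j'' < r.length := by simpa using Nat.lt_of_succ_lt_succ hj'
            simpa using hle j'' hj''
    · rw [if_neg hble]
      have hbgt : hb < b := not_le.mp hble
      by_cases h9b : b = 9
      · rw [if_pos h9b]
        right
        refine ⟨0, by simp, by simp, by simpa using hbgt, by intro j' hj'; omega, ?_⟩
        intro j' hj'
        cases j' with
        | zero => simp
        | succ j'' =>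
          have hj'' : j'' < r.length := by simpa using Nat.lt_of_succ_lt_succ hj'
          have h99 : r[j''] ≤ 9 := h9 _ (List.getElem_mem hj'') h9b
          simpa [h9b] using h99
      · rw [if_neg h9b]
        rcases ih (s + 1) b (s + 1) hpr with ⟨heq, hall⟩ | ⟨j, hj, heq, hlt, hstr, hle⟩
        · right
          refine ⟨0, by simp, ?_, by simpa using hbgt, by intro j' hj'; omega, ?_⟩
          · rw [heq]; simp
          · intro j' hj'
            cases j' with
            | zero => simp
            | succ j'' =>
              have hj'' : j'' < r.length := by simpa using Nat.lt_of_succ_lt_succ hj'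
              simpa using hall _ (List.getElem_mem hj'')
        · right
          refine ⟨j + 1, by simpa using Nat.succ_lt_succ hj, ?_, by simpa using lt_trans hbgt hlt, ?_, ?_⟩
          · rw [heq]
            simp only [List.getElem_cons_succ, Prod.mk.injEq]
            refine ⟨by trivial, by push_cast; ring⟩
          · intro j' hj'
            cases j' with
            | zero => simpa using hlt
            | succ j'' =>
              have hj'' : j'' < j := by omega
              simpa using hstr j'' hj''
          · intro j' hj'
            cases j' with
            | zero => simpa using le_of_lt hlt
            | succ j'' =>
              have hj'' : j'' < r.length := by simpa using Nat.lt_of_succ_lt_succ hj'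
              simpa using hle j'' hj''

lemma ff_spec (w : List Int) (hw : w ≠ [])
    (hp : List.Pairwise (fun a b => a = 9 → b ≤ 9) w) :
    ∃ j : Nat, ∃ hj : j < w.length,
      find_first_battery_with_highest_joltage w = (w[j], (j : Int))
      ∧ (∀ j' (_ : j' < j), w[j'] < w[j])
      ∧ (∀ j' (h' : j' < w.length), w[j'] ≤ w[j]) := by
  cases w with
  | nil => exact absurd rfl hw
  | cons b0 rest =>
    have hpr : List.Pairwise (fun a b => a = 9 → b ≤ 9) rest := (List.pairwise_cons.mp hp).2
    have hff : find_first_battery_with_highest_joltage (b0 :: rest)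
        = ffLoop b0 0 (PySem.List.enumerate rest 0) := by
      simp only [find_first_battery_with_highest_joltage, PySem.List.slice_from_one]
      rfl
    rcases ffLoop_spec rest 0 b0 0 hpr with ⟨heq, hall⟩ | ⟨j, hj, heq, hlt, hstr, hle⟩
    · refine ⟨0, by simp, ?_, by intro j' h; omega, ?_⟩
      · rw [hff, heq]; simp
      · intro j' hj'
        cases j' with
        | zero => simp
        | succ j'' =>
          have hj'' : j'' < rest.length := by simp only [List.length_cons] at hj'; omega
          simpa using hall _ (List.getElem_mem hj'')
    · refine ⟨j + 1, by simp only [List.length_cons]; omega, ?_, ?_, ?_⟩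
      · rw [hff, heq]
        simp only [List.getElem_cons_succ, Prod.mk.injEq]
        refine ⟨by trivial, by push_cast; ring⟩
      · intro j' hj'
        cases j' with
        | zero => simpa using hlt
        | succ j'' =>
          have hj'' : j'' < j := by omega
          simpa using hstr j'' hj''
      · intro j' hj'
        cases j' with
        | zero => simpa using le_of_lt hlt
        | succ j'' =>
          have hj'' : j'' < rest.length := by simp only [List.length_cons] at hj'; omega
          simpa using hle j'' hj''


lemma A_fold (bank : List Int)
    (hp : List.Pairwise (fun a b => a = 9 → b ≤ 9) bank) :
    ∀ (k off : Nat) (acc : List (Int × Int)), off + k ≤ bank.length →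
    ((PySem.List.pyRange (k : Int) 0 (-1)).foldl (fbStepA bank) (((off : Nat) : Int), acc)).2
      = acc ++ pvChain bank k off := by
  intro k
  induction k with
  | zero =>
    intro off acc h
    rw [show ((0 : Nat) : Int) = (0 : Int) by simp, PySem.List.pyRange_neg_one_eq_nil le_rfl]
    simp [pvChain]
  | succ k ih =>
    intro off acc h
    have hcons : PySem.List.pyRange ((k + 1 : Nat) : Int) 0 (-1)
        = ((k + 1 : Nat) : Int) :: PySem.List.pyRange (((k + 1 : Nat) : Int) - 1) 0 (-1) :=
      PySem.List.pyRange_neg_one_cons (by push_cast; omega)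
    have hc1 : ((k + 1 : Nat) : Int) - 1 = (k : Int) := by push_cast; ring
    rw [hcons, hc1, List.foldl_cons]
    have hwin : PySem.List.slice bank (some ((off : Nat) : Int))
          (some ((bank.length : Int) - ((k + 1 : Nat) : Int) + 1))
        = (bank.drop off).take (bank.length - k - off) := by
      rw [show (bank.length : Int) - ((k + 1 : Nat) : Int) + 1 = ((bank.length - k : Nat) : Int) by omega]
      rw [PySem.List.slice_natCast bank off (bank.length - k)]
    have hwlen : ((bank.drop off).take (bank.length - k - off)).length = bank.length - k - off := by
      simp only [List.length_take, List.length_drop]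
      omega
    have hwne : (bank.drop off).take (bank.length - k - off) ≠ [] := by
      apply List.ne_nil_of_length_pos
      rw [hwlen]; omega
    have hpw : List.Pairwise (fun a b => a = 9 → b ≤ 9) ((bank.drop off).take (bank.length - k - off)) :=
      List.Pairwise.sublist ((List.take_sublist _ _).trans (List.drop_sublist _ _)) hp
    rcases ff_spec _ hwne hpw with ⟨j, hj, hffeq, hstr, hle⟩
    have hjlt : j < bank.length - k - off := by rw [hwlen] at hj; exact hj
    have hstep : fbStepA bank (((off : Nat) : Int), acc) ((k + 1 : Nat) : Int)
        = ((((off + j + 1 : Nat)) : Int), acc ++ [(((bank.drop off).take (bank.length - k - off))[j], ((off : Nat) : Int) + (j : Int))]) := by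
      unfold fbStepA
      dsimp only
      rw [hwin, hffeq]
      refine Prod.ext ?_ rfl
      push_cast; ring
    rw [hstep]
    rw [ih (off + j + 1) _ (by omega)]
    have hch : pvChain bank (k + 1) off
        = (((bank.drop off).take (bank.length - k - off))[j], ((off : Nat) : Int) + (j : Int)) :: pvChain bank k (off + j + 1) := by
      rw [pvChain]
      rw [hffeq]
      simp
    rw [hch]
    simp [List.append_assoc]


lemma B_neg (bank : List Int) (c : Int) (hc : c ≤ 0) :
    ∀ l : List (Int × Int), l.foldl (fbStepB bank c) [] = [] := by
  intro l
  induction l with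
  | nil => rfl
  | cons p l ih =>
    have hstep : fbStepB bank c [] p = [] := by
      simp [fbStepB, fbPop]
      omega
    simpa [List.foldl_cons, hstep] using ih


lemma mem_fbPop (c nmi b : Int) : ∀ (s : List (Int × Int)) (q : Int × Int),
    q ∈ fbPop c nmi b s → q ∈ s := by
  intro s
  induction s with
  | nil => intro q h; simp [fbPop] at h
  | cons a rest ih =>
    intro q h
    obtain ⟨v, j⟩ := a
    rw [fbPop] at h
    split_ifs at h with hc
    · exact List.mem_cons_of_mem _ (ih q h)
    · exact h


lemma mem_foldl_fbStepB (bank : List Int) (c : Int) :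
    ∀ (l : List (Int × Int)) (s : List (Int × Int)) (q : Int × Int),
    q ∈ l.foldl (fbStepB bank c) s → q ∈ s ∨ (q.2, q.1) ∈ l := by
  have hstep : ∀ (s : List (Int × Int)) (p q : Int × Int),
      q ∈ fbStepB bank c s p → q ∈ s ∨ q = (p.2, p.1) := by
    intro s p q h
    unfold fbStepB at h
    dsimp only at h
    split_ifs at h with hc
    · rcases List.mem_cons.mp h with rfl | h
      · exact Or.inr rfl
      · exact Or.inl (mem_fbPop _ _ _ _ _ h)
    · exact Or.inl (mem_fbPop _ _ _ _ _ h)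
  intro l
  induction l with
  | nil => intro s q h; exact Or.inl h
  | cons p l ih =>
    intro s q h
    rcases ih (fbStepB bank c s p) q h with h' | h'
    · rcases hstep s p q h' with h'' | h''
      · exact Or.inl h''
      · exact Or.inr (by simp [h''])
    · exact Or.inr (List.mem_cons_of_mem _ h')


lemma fbPop_all (c nmi b : Int) (hge : c ≤ nmi) :
    ∀ s : List (Int × Int), (∀ q ∈ s, q.1 < b) → fbPop c nmi b s = [] := by
  intro s
  induction s with
  | nil => intro _; rfl
  | cons a rest ih =>
    intro hall
    obtain ⟨v, j⟩ := a
    rw [fbPop]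
    rw [if_pos]
    · exact ih (fun q hq => hall q (List.mem_cons_of_mem _ hq))
    · refine ⟨hall (v, j) List.mem_cons_self, ?_⟩
      have : (0 : Int) ≤ (rest.length : Int) := Int.natCast_nonneg _
      omega


lemma fbPop_append (c nmi b x : Int) (i1 : Int)
    (hno : ¬(x < b ∧ 1 + nmi > c)) :
    ∀ s : List (Int × Int),
    fbPop c nmi b (s ++ [(x, i1)]) = (fbPop (c - 1) nmi b s) ++ [(x, i1)] := by
  intro s
  induction s with
  | nil =>
    simp only [List.nil_append, fbPop]
    rw [if_neg (by simpa using hno)]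
  | cons a rest ih =>
    obtain ⟨v, j⟩ := a
    simp only [List.cons_append, fbPop]
    by_cases hv : v < b ∧ (rest.length : Int) + 1 + nmi > c - 1
    · rw [if_pos, if_pos hv]
      · exact ih
      · simpa using ⟨hv.1, by have := hv.2; omega⟩
    · rw [if_neg, if_neg hv]
      · simp
      · simp only [List.length_append, List.length_cons, List.length_nil]
        push_cast
        intro hcon
        exact hv ⟨hcon.1, by have := hcon.2; omega⟩


lemma foldl_fbStepB_append (bank : List Int) (c x : Int) (i1 : Int) :
    ∀ (Q : List (Int × Int)) (s : List (Int × Int)),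
    (∀ p ∈ Q, ¬(x < p.2 ∧ 1 + ((bank.length : Int) - p.1) > c)) →
    Q.foldl (fbStepB bank c) (s ++ [(x, i1)])
      = (Q.foldl (fbStepB bank (c - 1)) s) ++ [(x, i1)] := by
  intro Q
  induction Q with
  | nil => intro s _; rfl
  | cons p Q ih =>
    intro s hq
    have hstep : fbStepB bank c (s ++ [(x, i1)]) p = (fbStepB bank (c - 1) s p) ++ [(x, i1)] := by
      unfold fbStepB
      rw [fbPop_append c ((bank.length : Int) - p.1) p.2 x i1 (hq p List.mem_cons_self) s]
      by_cases hl : ((fbPop (c - 1) ((bank.length : Int) - p.1) p.2 s).length : Int) < c - 1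
      · rw [if_pos, if_pos hl]
        · rfl
        · simp only [List.length_append, List.length_cons, List.length_nil]
          push_cast
          omega
      · rw [if_neg, if_neg hl]
        · simp only [List.length_append, List.length_cons, List.length_nil]
          push_cast
          omega
    rw [List.foldl_cons, List.foldl_cons, hstep]
    exact ih _ (fun p' hp' => hq p' (List.mem_cons_of_mem _ hp'))


lemma fbStepB_crush (bank : List Int) (c : Int) (s : List (Int × Int)) (p : Int × Int)
    (hall : ∀ q ∈ s, q.1 < p.2) (hge : c ≤ (bank.length : Int) - p.1) (hc : 0 < c) :
    fbStepB bank c s p = [(p.2, p.1)] := by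
  unfold fbStepB
  dsimp only
  rw [fbPop_all c _ p.2 hge s hall]
  rw [if_pos (by simpa using hc)]

lemma B_run (bank : List Int)
    (hp : List.Pairwise (fun a b => a = 9 → b ≤ 9) bank) :
    ∀ (k off : Nat), off + k ≤ bank.length →
    (PySem.List.enumerate (bank.drop off) ((off : Nat) : Int)).foldl
        (fbStepB bank ((k : Nat) : Int)) []
      = (pvChain bank k off).reverse := by
  intro k
  induction k with
  | zero =>
    intro off h
    rw [B_neg bank _ (by simp)]
    simp [pvChain]
  | succ k ih =>
    intro off h
    have hwlen : ((bank.drop off).take (bank.length - k - off)).length = bank.length - k - off := by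
      simp only [List.length_take, List.length_drop]
      omega
    have hwne : (bank.drop off).take (bank.length - k - off) ≠ [] := by
      apply List.ne_nil_of_length_pos
      rw [hwlen]; omega
    have hpw : List.Pairwise (fun a b => a = 9 → b ≤ 9) ((bank.drop off).take (bank.length - k - off)) :=
      List.Pairwise.sublist ((List.take_sublist _ _).trans (List.drop_sublist _ _)) hp
    rcases ff_spec _ hwne hpw with ⟨j, hj, hffeq, hstr, hle⟩
    have hjlt : j < bank.length - k - off := by rw [hwlen] at hj; exact hj
    have hoffj : off + j < bank.length := by omega
    -- window entries are bank entries
    have hwidx : ∀ j' (h' : j' < bank.length - k - off),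
        ((bank.drop off).take (bank.length - k - off))[j']'(by rw [hwlen]; exact h')
          = bank[off + j']'(by omega) := by
      intro j' h'
      simp [List.getElem_take, List.getElem_drop]
    have hx : ((bank.drop off).take (bank.length - k - off))[j] = bank[off + j]'hoffj := hwidx j hjlt
    -- decompose the suffix at the picked position
    have hdec : bank.drop off
        = (bank.drop off).take j ++ bank[off + j]'hoffj :: bank.drop (off + j + 1) := by
      conv_lhs => rw [← List.take_append_drop j (bank.drop off)]
      congr 1
      rw [List.drop_drop]
      rw [List.drop_eq_getElem_cons hoffj]
    have hPlen : ((bank.drop off).take j).length = j := by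
      simp only [List.length_take, List.length_drop]
      omega
    rw [hdec, PySem.List.enumerate_append, hPlen, PySem.List.enumerate_cons,
        List.foldl_append, List.foldl_cons]
    -- phase 1: everything before the pick is strictly smaller, so it is all popped
    have hsPlt : ∀ q ∈ (PySem.List.enumerate ((bank.drop off).take j) ((off : Nat) : Int)).foldl
        (fbStepB bank ((k + 1 : Nat) : Int)) [], q.1 < bank[off + j]'hoffj := by
      intro q hq
      rcases mem_foldl_fbStepB bank _ _ _ q hq with h0 | hmem
      · simp at h0
      · rcases (PySem.List.mem_enumerate_iff _ _ _).mp hmem with ⟨j2, hj2, hpq⟩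
        have hj2j : j2 < j := by
          have := hj2
          simp only [List.length_take, List.length_drop] at this
          omega
        have h2 := congrArg Prod.snd hpq
        simp at h2
        rw [h2, ← hwidx j2 (by omega), ← hx]
        exact hstr j2 hj2j
    have hstep1 : fbStepB bank ((k + 1 : Nat) : Int)
        ((PySem.List.enumerate ((bank.drop off).take j) ((off : Nat) : Int)).foldl
          (fbStepB bank ((k + 1 : Nat) : Int)) [])
        (((off : Nat) : Int) + (j : Int), bank[off + j]'hoffj)
        = [(bank[off + j]'hoffj, ((off : Nat) : Int) + (j : Int))] :=
      fbStepB_crush bank _ _ _ hsPlt (by push_cast; omega) (by push_cast; omega)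
    rw [hstep1]
    -- phase 2: the picked battery is never popped while the suffix is processed
    have hQ : ∀ p ∈ PySem.List.enumerate (bank.drop (off + j + 1)) (((off : Nat) : Int) + (j : Int) + 1),
        ¬((bank[off + j]'hoffj) < p.2 ∧ 1 + ((bank.length : Int) - p.1) > ((k + 1 : Nat) : Int)) := by
      intro p hp2
      rcases (PySem.List.mem_enumerate_iff _ _ _).mp hp2 with ⟨j2, hj2, hpq⟩
      have hj2' : off + j + 1 + j2 < bank.length := by
        have := hj2
        simp only [List.length_drop] at this
        omega
      have hp1 : p.1 = ((off + j + 1 + j2 : Nat) : Int) := by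
        have := congrArg Prod.fst hpq
        simp at this
        rw [this]; push_cast; ring
      have hp2v : p.2 = bank[off + j + 1 + j2]'hj2' := by
        have h2 := congrArg Prod.snd hpq
        simp at h2
        exact h2
      rintro ⟨hlt2, hbig⟩
      rw [hp1] at hbig
      -- the remaining-budget guard forces the position inside the window
      have hpos : off + j + 1 + j2 < bank.length - k := by
        push_cast at hbig
        omega
      have hposw : (j + 1 + j2) < bank.length - k - off := by omega
      have hle2 : bank[off + j + 1 + j2]'hj2' ≤ bank[off + j]'hoffj := by
        have l := hle (j + 1 + j2) (by rw [hwlen]; exact hposw)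
        rw [hwidx (j + 1 + j2) hposw, hx] at l
        simp only [show off + (j + 1 + j2) = off + j + 1 + j2 from by omega] at l
        exact l
      rw [hp2v] at hlt2
      exact absurd hlt2 (not_lt.mpr hle2)
    have hbot := foldl_fbStepB_append bank ((k + 1 : Nat) : Int) (bank[off + j]'hoffj)
      (((off : Nat) : Int) + (j : Int))
      (PySem.List.enumerate (bank.drop (off + j + 1)) (((off : Nat) : Int) + (j : Int) + 1)) [] hQ
    rw [List.nil_append] at hbot
    rw [hbot]
    rw [show ((k + 1 : Nat) : Int) - 1 = ((k : Nat) : Int) by push_cast; ring]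
    rw [show ((off : Nat) : Int) + (j : Int) + 1 = (((off + j + 1 : Nat)) : Int) by push_cast; ring]
    rw [ih (off + j + 1) (by omega)]
    have hch : pvChain bank (k + 1) off
        = (bank[off + j]'hoffj, ((off : Nat) : Int) + (j : Int)) :: pvChain bank k (off + j + 1) := by
      rw [pvChain]
      rw [hffeq]
      simp [hx]
    rw [hch]
    simp


-- ===== VERDICT (by name: the statement is the Claim_ definition above) =====
theorem find_batteries_to_turn_on_spec : Claim_equal_find_batteries_to_turn_on := by
  intro bank count _ hpre
  obtain ⟨hcnt, hp⟩ := hpre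
  unfold Spec_find_batteries_to_turn_on
  unfold find_batteries_to_turn_on find_batteries_to_turn_on_alt
  by_cases hc : count ≤ 0
  · rw [PySem.List.pyRange_neg_one_eq_nil hc, B_neg bank count hc]
    rfl
  · rw [not_le] at hc
    have hA := A_fold bank hp count.toNat 0 [] (by omega)
    have hB := B_run bank hp count.toNat 0 (by omega)
    rw [List.drop_zero] at hB
    simp only [List.nil_append] at hA
    rw [show ((0 : Nat) : Int) = (0 : Int) from rfl] at hA hB
    rw [show count = ((count.toNat : Nat) : Int) from (Int.toNat_of_nonneg (le_of_lt hc)).symm]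
    rw [hA, hB, List.reverse_reverse]
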